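-- pv_equiv track=rewrite | github.com/Dicalius/RF-433 | decode_oregon2.py | reconstruire_bitstream
-- ===== SOURCE A (Python) =====
-- def reconstruire_bitstream(symboles):
--     bitstream = [1]
--     for symbole in symboles:
--         if symbole == 'S':
--             bitstream.append(bitstream[-1])
--         elif symbole == 'L':
--             bitstream.append(1 - bitstream[-1])
--     return bitstream
-- ===== SOURCE B (Python) =====
-- def reconstruire_bitstream(symboles):
--     kept = [s for s in symboles if s in ('S', 'L')]
--     return [(1 + kept[:i].count('L')) % 2 for i in range(len(kept) + 1)]
-- ===== Notes on version B (the rewrite author's own statement) =====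
-- stated objective: alternative
-- what changed: B has no running state at all: it filters the symbols once, then computes each output bit independently as a closed form -- bit i is the parity (1 + number of 'L' in the first i kept symbols) % 2 -- instead of A's sequential loop that rereads the last appended bit to copy or flip it.
import Mathlib
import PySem

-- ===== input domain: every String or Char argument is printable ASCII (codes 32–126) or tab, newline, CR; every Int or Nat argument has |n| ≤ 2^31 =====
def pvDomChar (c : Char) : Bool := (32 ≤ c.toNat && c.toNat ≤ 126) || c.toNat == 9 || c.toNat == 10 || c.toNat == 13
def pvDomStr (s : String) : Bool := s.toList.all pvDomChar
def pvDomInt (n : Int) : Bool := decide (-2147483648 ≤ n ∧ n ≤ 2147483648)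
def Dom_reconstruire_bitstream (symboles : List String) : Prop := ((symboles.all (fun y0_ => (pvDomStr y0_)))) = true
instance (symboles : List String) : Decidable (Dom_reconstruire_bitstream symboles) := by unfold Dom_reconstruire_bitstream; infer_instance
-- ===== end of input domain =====

-- B drops A's sequential last-bit-rereading loop: it computes every output bit independently
-- as the closed form (1 + #'L' in the first i kept symbols) % 2 (alternative decomposition).

-- ===== PORT A =====
-- bitstream[-1]: the list always contains at least the seed 1, so pyGetD with default 0 is exact.
def pvStepA (bs : List Int) (s : String) : List Int :=
  if s == "S" then bs ++ [PySem.List.pyGetD bs (-1) 0]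
  else if s == "L" then bs ++ [1 - PySem.List.pyGetD bs (-1) 0]
  else bs

def reconstruire_bitstream (symboles : List String) : List Int :=
  symboles.foldl pvStepA [1]

-- ===== PORT B =====
-- kept = [s for s in symboles if s in ('S', 'L')]
-- return [(1 + kept[:i].count('L')) % 2 for i in range(len(kept) + 1)]
def pvOutB (kept : List String) : List Int :=
  (PySem.List.pyRange 0 ((kept.length : Int) + 1) 1).map
    (fun i => PySem.Int.mod (1 + (PySem.List.count (PySem.List.slice kept none (some i)) "L" : Int)) 2)

def reconstruire_bitstream_alt (symboles : List String) : List Int :=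
  pvOutB (symboles.filter (fun s => s == "S" || s == "L"))

-- ===== PRECONDITION & SPEC =====
def Spec_reconstruire_bitstream (symboles : List String) (out : List Int) : Prop := out = reconstruire_bitstream_alt symboles
instance (symboles : List String) (out : List Int) : Decidable (Spec_reconstruire_bitstream symboles out) := by unfold Spec_reconstruire_bitstream; infer_instance

-- ===== CLAIM (what is proved, stated in full; the proofs are below) =====
def Claim_equal_reconstruire_bitstream : Prop := ∀ (symboles : List String), Dom_reconstruire_bitstream symboles → Spec_reconstruire_bitstream symboles (reconstruire_bitstream symboles)

-- ===== LEMMAS AND PROOFS =====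

-- pvOutB k splits off its last bit, which is (1 + count of 'L' in k) % 2.
lemma pv_outB_snoc (k : List String) :
    pvOutB k = ((PySem.List.pyRange 0 (k.length : Int) 1).map
        (fun i => PySem.Int.mod (1 + (PySem.List.count (PySem.List.slice k none (some i)) "L" : Int)) 2))
      ++ [PySem.Int.mod (1 + (k.count "L" : Int)) 2] := by
  rw [pvOutB, PySem.List.pyRange_one_succ_right (show (0:Int) ≤ (k.length : Int) by positivity),
    List.map_append]
  simp [PySem.List.count_eq, PySem.List.slice_to k (show (0:Int) ≤ (k.length : Int) by positivity)]

-- A's fold ignores symbols that are neither 'S' nor 'L'.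
lemma pv_foldA_filter : ∀ (l : List String) (bs : List Int),
    l.foldl pvStepA bs = (l.filter (fun s => s == "S" || s == "L")).foldl pvStepA bs := by
  intro l
  induction l with
  | nil => intro bs; rfl
  | cons s t ih =>
    intro bs
    by_cases hS : s == "S"
    · simp only [List.foldl_cons, List.filter_cons, hS, Bool.true_or, if_pos]
      exact ih _
    · by_cases hL : s == "L"
      · simp only [List.foldl_cons, List.filter_cons, hS, hL, Bool.false_or, if_pos]
        exact ih _
      · simp only [List.foldl_cons, List.filter_cons, hS, hL, Bool.or_self,
          if_neg, pvStepA, Bool.not_eq_true]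
        simpa [pvStepA, hS, hL] using ih bs

-- On a kept prefix only the first i symbols matter, so appending one symbol leaves the old bits alone.
lemma pv_outB_append (k : List String) (s : String) :
    pvOutB (k ++ [s]) = pvOutB k ++ [PySem.Int.mod (1 + ((k ++ [s]).count "L" : Int)) 2] := by
  rw [pv_outB_snoc (k ++ [s]), pvOutB]
  congr 1
  · rw [List.length_append, List.length_singleton]
    have : ((k.length + 1 : Nat) : Int) = (k.length : Int) + 1 := by push_cast; ring
    rw [this]
    apply List.map_congr_left
    intro i hi
    have hmem := (PySem.List.mem_pyRange_one).1 hi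
    have h0 : 0 ≤ i := hmem.1
    have h1 : i < (k.length : Int) + 1 := hmem.2
    have hle : i.toNat ≤ k.length := by omega
    rw [PySem.List.slice_to (k ++ [s]) h0, PySem.List.slice_to k h0,
      List.take_append_of_le_length hle]

-- Core invariant: on a list of kept symbols, A's fold produces exactly B's closed-form bits.
lemma pv_core : ∀ (k : List String), (∀ s ∈ k, s = "S" ∨ s = "L") →
    k.foldl pvStepA [1] = pvOutB k := by
  intro k
  induction k using List.reverseRecOn with
  | nil => intro _; decide
  | append_singleton t s ih =>
    intro h
    have ht : ∀ x ∈ t, x = "S" ∨ x = "L" := fun x hx => h x (List.mem_append_left _ hx)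
    have hs : s = "S" ∨ s = "L" := h s (List.mem_append_right _ (List.mem_singleton.2 rfl))
    have hlast : PySem.List.pyGetD (pvOutB t) (-1) 0
        = PySem.Int.mod (1 + (t.count "L" : Int)) 2 := by
      rw [pv_outB_snoc t, PySem.List.pyGetD_neg_one_append_singleton]
    rw [List.foldl_append, ih ht, pv_outB_append, List.foldl_cons, List.foldl_nil]
    rcases hs with h' | h' <;> subst h'
    · rw [pvStepA, if_pos (by decide), hlast]
      congr 2
      simp
    · rw [pvStepA, if_neg (by decide), if_pos (by decide), hlast]
      congr 2
      rw [List.count_append]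
      simp only [List.count_singleton]
      norm_num
      omega

-- ===== VERDICT (by name: the statement is the Claim_ definition above) =====
theorem reconstruire_bitstream_spec : Claim_equal_reconstruire_bitstream := by
  intro symboles _
  unfold Spec_reconstruire_bitstream reconstruire_bitstream reconstruire_bitstream_alt
  rw [pv_foldA_filter]
  apply pv_core
  intro s hs
  have := List.of_mem_filter hs
  rcases Bool.or_eq_true_iff.1 this with h | h
  · exact Or.inl (by simpa using h)
  · exact Or.inr (by simpa using h)
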